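-- pv_equiv track=rewrite | github.com/K4cePhoenix/advent-of-code | 2017/aoc2017_04.py | part_1
-- ===== SOURCE A (Python) =====
-- def part_1(data):
--     valid_phrases = 0
--     for l in data:
--         d = l.split()
--         valid = True
--         for i in range(len(d)):
--             if d[i] in d[:i]:
--                 valid = False
--                 break
--             if d[i] in d[i+1:]:
--                 valid = False
--                 break
--         if valid:
--             valid_phrases += 1
--     return valid_phrases
-- ===== SOURCE B (Python) =====
-- def _all_distinct(tokens):
--     s = sorted(tokens)
--     return all(x != y for x, y in zip(s, s[1:]))
--
--
-- def part_1(data):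
--     return sum(1 for line in data if _all_distinct(line.split()))
-- ===== Notes on version B (the rewrite author's own statement) =====
-- stated objective: alternative
-- what changed: Per line, instead of A's quadratic scan that tests each token for membership in the prefix and suffix slices, B sorts the tokens once and makes a single pass comparing adjacent elements, counting lines with no adjacent-equal pair.
import Mathlib
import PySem

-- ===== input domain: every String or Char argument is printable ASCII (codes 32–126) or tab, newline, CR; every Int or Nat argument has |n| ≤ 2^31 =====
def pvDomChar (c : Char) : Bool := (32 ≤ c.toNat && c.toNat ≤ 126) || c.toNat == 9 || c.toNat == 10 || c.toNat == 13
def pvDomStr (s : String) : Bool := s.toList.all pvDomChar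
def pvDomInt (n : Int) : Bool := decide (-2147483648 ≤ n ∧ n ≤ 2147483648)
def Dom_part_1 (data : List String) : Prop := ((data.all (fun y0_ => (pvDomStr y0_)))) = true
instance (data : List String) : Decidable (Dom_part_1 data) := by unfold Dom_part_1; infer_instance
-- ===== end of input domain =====

-- B replaces A's per-line quadratic prefix/suffix membership scans with sort-then-adjacent-compare; same counts, different algorithm.


-- ===== PORT A =====
-- inner 'for i in range(len(d))' with its two slice-membership tests and breaks;
-- d[i] is always in range here, so pyGetD with a default is exact
def part1Check (d : List String) (i : Nat) : Bool :=
  if _h : i < d.length then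
    if (PySem.List.slice d none (some (i : Int))).contains (PySem.List.pyGetD d (i : Int) "") then
      false
    else if (PySem.List.slice d (some ((i : Int) + 1)) none).contains (PySem.List.pyGetD d (i : Int) "") then
      false
    else part1Check d (i + 1)
  else true
termination_by d.length - i

def part_1 (data : List String) : Int :=
  data.foldl (fun valid_phrases l =>
    if part1Check (PySem.Str.split₀ l) 0 then valid_phrases + 1 else valid_phrases) 0

-- ===== PORT B =====
-- per line: sort the tokens, then a single adjacent-pair pass (zip s s[1:])
def allDistinct (tokens : List String) : Bool :=
  ((PySem.List.sorted tokens (fun x => x) false).zip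
    (PySem.List.slice (PySem.List.sorted tokens (fun x => x) false) (some 1) none)).all
    (fun p => p.1 != p.2)

def part_1_alt (data : List String) : Int :=
  (data.countP (fun line => allDistinct (PySem.Str.split₀ line)) : Int)

-- ===== PRECONDITION & SPEC =====
def Spec_part_1 (data : List String) (out : Int) : Prop := out = part_1_alt data
instance (data : List String) (out : Int) : Decidable (Spec_part_1 data out) := by unfold Spec_part_1; infer_instance

-- ===== CLAIM (what is proved, stated in full; the proofs are below) =====
def Claim_equal_part_1 : Prop := ∀ (data : List String), Dom_part_1 data → Spec_part_1 data (part_1 data)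

-- ===== LEMMAS AND PROOFS =====

-- A's inner loop returns true iff from index i on, no element recurs before or after its position
lemma part1Check_iff (d : List String) (i : Nat) :
    part1Check d i = true ↔
      ∀ j, i ≤ j → ∀ (hj : j < d.length), d[j] ∉ d.take j ∧ d[j] ∉ d.drop (j + 1) := by
  induction i using (part1Check.induct d) with
  | case1 i h hmem =>
      rw [part1Check]
      simp only [h, dif_pos, hmem, if_pos]
      constructor
      · intro hfalse; cases hfalse
      · intro hall
        exfalso
        have := (hall i le_rfl h).1
        simp only [PySem.List.slice_to_natCast, PySem.List.pyGetD_natCast,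
          List.getD_eq_getElem?_getD, List.getElem?_eq_getElem h, Option.getD_some,
          List.contains_iff_mem] at hmem
        exact this hmem
  | case2 i h hmem1 hmem2 =>
      rw [part1Check]
      simp only [h, dif_pos, hmem1, Bool.false_eq_true, if_false, hmem2, if_pos]
      constructor
      · intro hfalse; cases hfalse
      · intro hall
        exfalso
        have := (hall i le_rfl h).2
        have hcast : ((i : Int) + 1) = (((i + 1 : Nat)) : Int) := by push_cast; ring
        rw [hcast, PySem.List.slice_from_natCast] at hmem2
        simp only [PySem.List.pyGetD_natCast, List.getD_eq_getElem?_getD,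
          List.getElem?_eq_getElem h, Option.getD_some,
          List.contains_iff_mem] at hmem2
        exact this hmem2
  | case3 i h hmem1 hmem2 ih =>
      rw [part1Check]
      simp only [h, dif_pos, hmem1, hmem2, Bool.false_eq_true, if_false]
      rw [ih]
      constructor
      · intro hall j hij hj
        rcases Nat.lt_or_ge i j with hlt | hge
        · exact hall j hlt hj
        · have hji : j = i := le_antisymm (le_of_not_gt (fun hh => absurd hij (by omega))) hij
          subst hji
          constructor
          · intro hm
            apply hmem1
            simp only [PySem.List.slice_to_natCast, PySem.List.pyGetD_natCast,
              List.getD_eq_getElem?_getD, List.getElem?_eq_getElem h, Option.getD_some,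
              List.contains_iff_mem]
            exact hm
          · intro hm
            apply hmem2
            have hcast : ((j : Int) + 1) = (((j + 1 : Nat)) : Int) := by push_cast; ring
            rw [hcast, PySem.List.slice_from_natCast]
            simp only [PySem.List.pyGetD_natCast, List.getD_eq_getElem?_getD,
              List.getElem?_eq_getElem h, Option.getD_some,
              List.contains_iff_mem]
            exact hm
      · intro hall j hij hj
        exact hall j (Nat.le_of_succ_le hij) hj
  | case4 i h =>
      rw [part1Check]
      simp only [h]
      constructor
      · intro _ j hij hj
        exact absurd hj (by omega)
      · intro _; rfl

-- A's inner loop from 0 decides exactly Nodup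
lemma part1Check_eq_nodup (d : List String) : part1Check d 0 = true ↔ d.Nodup := by
  rw [part1Check_iff]
  constructor
  · intro hall
    rw [List.Nodup, List.pairwise_iff_getElem]
    intro p q hp hq hpq heq
    have := (hall q (Nat.zero_le q) hq).1
    apply this
    rw [List.mem_take_iff_getElem]
    exact ⟨p, by omega, heq⟩
  · intro hnd j _ hj
    constructor
    · intro hm
      rw [List.mem_take_iff_getElem] at hm
      obtain ⟨p, hp, hpe⟩ := hm
      have : p = j := (List.Nodup.getElem_inj_iff hnd).mp hpe
      omega
    · intro hm
      rw [List.mem_iff_getElem] at hm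
      obtain ⟨k, hk, hke⟩ := hm
      rw [List.getElem_drop] at hke
      have : j + 1 + k = j := (List.Nodup.getElem_inj_iff hnd).mp hke
      omega

-- B's adjacent-pair pass on a ≤-sorted list decides Nodup
lemma zip_tail_all_ne_iff_nodup (l : List String) (hp : l.Pairwise (· ≤ ·)) :
    ((l.zip l.tail).all (fun p => p.1 != p.2)) = true ↔ l.Nodup := by
  induction l with
  | nil => simp
  | cons a t ih =>
      cases t with
      | nil => simp
      | cons b t' =>
          have hp' : (b :: t').Pairwise (· ≤ ·) := hp.tail
          simp only [List.tail_cons] at ih ⊢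
          simp only [List.zip_cons_cons, List.all_cons, Bool.and_eq_true, bne_iff_ne, ne_eq]
          rw [ih hp']
          constructor
          · rintro ⟨hab, hnd⟩
            rw [List.nodup_cons]
            refine ⟨fun hm => ?_, hnd⟩
            rcases List.mem_cons.mp hm with hm | hm
            · exact hab hm
            · -- a ∈ t' : a ≤ b (pairwise) and b ≤ a (pairwise in tail) force a = b
              have h1 : a ≤ b := (List.pairwise_cons.mp hp).1 b (by simp)
              have h2 : b ≤ a := (List.pairwise_cons.mp hp').1 a hm
              exact hab (le_antisymm h1 h2)
          · intro hnd
            rw [List.nodup_cons] at hnd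
            exact ⟨fun h => hnd.1 (h ▸ List.mem_cons_self), hnd.2⟩

lemma allDistinct_iff (tokens : List String) : allDistinct tokens = true ↔ tokens.Nodup := by
  unfold allDistinct
  rw [PySem.List.slice_from_one]

  rw [zip_tail_all_ne_iff_nodup _ (PySem.List.sorted_pairwise tokens (fun x => x))]
  exact (PySem.List.sorted_perm tokens (fun x => x) false).nodup_iff

lemma per_line (l : String) :
    part1Check (PySem.Str.split₀ l) 0 = allDistinct (PySem.Str.split₀ l) := by
  rw [Bool.eq_iff_iff, part1Check_eq_nodup, allDistinct_iff]

-- ===== VERDICT (by name: the statement is the Claim_ definition above) =====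
theorem part_1_spec : Claim_equal_part_1 := by
  intro data _
  unfold Spec_part_1 part_1 part_1_alt
  simp only [per_line]
  rw [PySem.List.foldl_count_if (fun line => allDistinct (PySem.Str.split₀ line)) data 0]
  simp
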